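-- pv_equiv track=rewrite | github.com/tirameshu/CS3235 | 3/search.py | get_top_match
-- ===== SOURCE A (Python) =====
-- def get_top_match(ranked_result):
--     min_rank = 100
--     best_matched_url = 0
--     all_values = list(ranked_result.values()) # nested list of ranks
--
--     length = len(all_values[0])
--
--     for lst in all_values:
--         assert(len(lst) == length) # sanity check
--
--     for i in range (length):
--         score = sum(map(lambda x: x[i], all_values))
--         if score < min_rank:
--             min_rank = score
--             best_matched_url = i+1 # url_id
--
--     return best_matched_url
-- ===== SOURCE B (Python) =====
-- def get_top_match(ranked_result):
--     all_values = list(ranked_result.values())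
--     length = len(all_values[0])
--     for lst in all_values:
--         assert(len(lst) == length)
--     # one forward pass accumulating all column sums at once
--     scores = [0] * length
--     for lst in all_values:
--         scores = [s + x for s, x in zip(scores, lst)]
--     min_rank = 100
--     best = 0
--     for i, s in enumerate(scores):
--         if s < min_rank:
--             min_rank = s
--             best = i + 1
--     return best
-- ===== Notes on version B (the rewrite author's own statement) =====
-- stated objective: alternative
-- what changed: B builds all column sums in one forward pass over the value lists (accumulate-then-scan) instead of re-scanning every list once per column as A does.
import Mathlib
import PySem

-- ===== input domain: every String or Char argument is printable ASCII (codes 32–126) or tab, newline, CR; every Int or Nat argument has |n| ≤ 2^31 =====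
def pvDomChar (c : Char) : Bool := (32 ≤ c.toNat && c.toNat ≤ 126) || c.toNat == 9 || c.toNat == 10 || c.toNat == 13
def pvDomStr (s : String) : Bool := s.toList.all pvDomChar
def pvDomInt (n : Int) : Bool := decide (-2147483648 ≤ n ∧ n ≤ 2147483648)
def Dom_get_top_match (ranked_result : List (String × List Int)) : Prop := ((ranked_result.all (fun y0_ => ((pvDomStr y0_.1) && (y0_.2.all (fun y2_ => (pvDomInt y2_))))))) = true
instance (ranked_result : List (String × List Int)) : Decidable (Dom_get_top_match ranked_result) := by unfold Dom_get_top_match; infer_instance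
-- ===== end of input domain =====

-- B replaces A's per-column re-scans of all value lists by one forward pass that accumulates
-- all column sums, then a single scan (alternative decomposition, same results).


-- ===== PORT A =====
-- Port of A: list(ranked_result.values()); length = len(all_values[0]); per-column sum scan.
-- (Pre_ guarantees every i drawn from the range is in bounds, so pyGetD's default is never used.)
def get_top_match (ranked_result : List (String × List Int)) : Int :=
  let all_values := (PySem.Dict.ofList ranked_result).values
  let length : Int := PySem.List.len (all_values.headD [])
  let res := (PySem.List.pyRange 0 length 1).foldl
    (fun (st : Int × Int) i =>
      let score := all_values.foldl (fun s lst => s + PySem.List.pyGetD lst i 0) 0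
      if score < st.1 then (score, i + 1) else st)
    (100, 0)
  res.2

-- ===== PORT B =====
-- Port of B: accumulate all column sums in one pass (zip-add fold), then scan once with enumerate.
def get_top_match_alt (ranked_result : List (String × List Int)) : Int :=
  let all_values := (PySem.Dict.ofList ranked_result).values
  let length := (all_values.headD []).length
  let scores := all_values.foldl
    (fun sc lst => (sc.zip lst).map (fun p => p.1 + p.2))
    (List.replicate length (0 : Int))
  let res := (PySem.List.enumerate scores 0).foldl
    (fun (st : Int × Int) p => if p.2 < st.1 then (p.2, p.1 + 1) else st)
    (100, 0)
  res.2

-- ===== PRECONDITION & SPEC =====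
-- Pre_ excludes the empty dict (A raises IndexError on all_values[0]) and value lists of
-- unequal lengths (A raises AssertionError).
def Pre_get_top_match (ranked_result : List (String × List Int)) : Prop :=
  ranked_result ≠ [] ∧
  ∀ l ∈ (PySem.Dict.ofList ranked_result).values,
    l.length = (((PySem.Dict.ofList ranked_result).values).headD []).length
instance (ranked_result : List (String × List Int)) : Decidable (Pre_get_top_match ranked_result) := by
  unfold Pre_get_top_match; infer_instance
def pvWitness_get_top_match : (List (String × List Int)) := [("a", [3, 5]), ("b", [2, 1])]

def Spec_get_top_match (ranked_result : List (String × List Int)) (out : Int) : Prop := out = get_top_match_alt ranked_result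
instance (ranked_result : List (String × List Int)) (out : Int) : Decidable (Spec_get_top_match ranked_result out) := by unfold Spec_get_top_match; infer_instance

-- ===== CLAIM (what is proved, stated in full; the proofs are below) =====
def Claim_equal_get_top_match : Prop := ∀ (ranked_result : List (String × List Int)), Dom_get_top_match ranked_result → Pre_get_top_match ranked_result → Spec_get_top_match ranked_result (get_top_match ranked_result)

-- ===== LEMMAS AND PROOFS =====

-- B's accumulation step preserves the length of the score table.
theorem pv_colsum_len (vals : List (List Int)) (L : Nat)
    (h : ∀ l ∈ vals, l.length = L) (init : List Int) (hlen : init.length = L) :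
    (vals.foldl (fun sc lst => (sc.zip lst).map (fun p => p.1 + p.2)) init).length = L := by
  induction vals generalizing init with
  | nil => simpa using hlen
  | cons l vals ih =>
    have hl : l.length = L := h l (by simp)
    exact ih (fun x hx => h x (by simp [hx])) _ (by simp [hlen, hl])

-- Entry k of B's accumulated score table is A's column-k sum.
theorem pv_colsum_getD (vals : List (List Int)) (L : Nat)
    (h : ∀ l ∈ vals, l.length = L) (k : Nat) (hk : k < L)
    (init : List Int) (hlen : init.length = L) :
    (vals.foldl (fun sc lst => (sc.zip lst).map (fun p => p.1 + p.2)) init).getD k 0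
      = vals.foldl (fun s lst => s + lst.getD k 0) (init.getD k 0) := by
  induction vals generalizing init with
  | nil => simp
  | cons l vals ih =>
    have hl : l.length = L := h l (by simp)
    have hstep : ((init.zip l).map (fun p => p.1 + p.2)).getD k 0
        = init.getD k 0 + l.getD k 0 := by
      have h1 : k < init.length := by omega
      have h2 : k < l.length := by omega
      have h3 : k < (init.zip l).length := by simp [List.length_zip]; omega
      simp [List.getD_eq_getElem?_getD, h1, h2, List.getElem_zip, List.getElem_map]
    rw [List.foldl_cons, List.foldl_cons,
      ih (fun x hx => h x (by simp [hx])) _ (by simp [hlen, hl]), hstep]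

-- B's enumerate scan equals an index scan over List.range.
theorem pv_scan_eq (sc : List Int) (s : Nat) (st : Int × Int) :
    (PySem.List.enumerate sc (s : Int)).foldl
        (fun (st : Int × Int) p => if p.2 < st.1 then (p.2, p.1 + 1) else st) st
      = (List.range sc.length).foldl
        (fun (st : Int × Int) k =>
          if sc.getD k 0 < st.1 then (sc.getD k 0, ((s + k : Nat) : Int) + 1) else st) st := by
  induction sc generalizing s st with
  | nil => simp [PySem.List.enumerate_nil]
  | cons x sc ih =>
    rw [PySem.List.enumerate_cons, List.foldl_cons]
    have hc : ((s : Int) + 1) = ((s + 1 : Nat) : Int) := by push_cast; ring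
    rw [hc, ih]
    rw [List.length_cons, List.range_succ_eq_map, List.foldl_cons, List.foldl_map]
    simp only [List.getD_cons_zero, List.getD_cons_succ, Nat.succ_eq_add_one]
    push_cast
    ring_nf

-- ===== VERDICT (by name: the statement is the Claim_ definition above) =====
theorem get_top_match_spec : Claim_equal_get_top_match := by
  intro rr _ hpre
  obtain ⟨-, hlen⟩ := hpre
  unfold Spec_get_top_match get_top_match get_top_match_alt
  dsimp only
  set vals := (PySem.Dict.ofList rr).values with hvals
  set L := (vals.headD []).length with hL
  have hlen' : ∀ l ∈ vals, l.length = L := hlen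
  have hslen : (vals.foldl (fun sc lst => (sc.zip lst).map (fun p => p.1 + p.2))
      (List.replicate L (0 : Int))).length = L :=
    pv_colsum_len vals L hlen' _ (by simp)
  have hscan := pv_scan_eq (vals.foldl (fun sc lst => (sc.zip lst).map (fun p => p.1 + p.2))
      (List.replicate L (0 : Int))) 0 (100, 0)
  simp only [Nat.cast_zero, zero_add] at hscan
  rw [hscan, hslen]
  have hA : PySem.List.pyRange 0 (PySem.List.len (vals.headD [])) 1
      = (List.range L).map (fun (k : Nat) => (k : Int)) := by
    have h1 : PySem.List.len (vals.headD []) = (L : Int) := rfl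
    rw [h1, PySem.List.pyRange_one]
    have h2 : ((L : Int) - 0).toNat = L := by omega
    rw [h2]
    simp
  conv_lhs => rw [hA, List.foldl_map]
  refine congrArg Prod.snd ?_
  apply PySem.List.foldl_congr_mem'
  intro k hk acc
  have hkL : k < L := List.mem_range.mp hk
  have hscore : vals.foldl (fun s lst => s + PySem.List.pyGetD lst (k : Int) 0) 0
      = (vals.foldl (fun sc lst => (sc.zip lst).map (fun p => p.1 + p.2))
          (List.replicate L (0 : Int))).getD k 0 := by
    rw [pv_colsum_getD vals L hlen' k hkL _ (by simp)]
    simp [PySem.List.pyGetD_natCast]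
  simp only [hscore]
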